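-- pv_equiv track=rewrite | github.com/sunny-ops/Amazon_OA | Count Faults.py | countFaults
-- ===== SOURCE A (Python) =====
-- from collections import Counter
--
-- def countFaults(n: int, logs):
--   ans = 0
--   c = Counter()
--   for log in logs:
--     server, res = log.split(" ")
--     if res == "success":
--       continue
--     else:
--       c[server] += 1
--       if c[server] == 3:
--         ans += 1
--         c[server] = 0
--
--   return ans
-- ===== SOURCE B (Python) =====
-- def countFaults(n, logs):
--   fails = []
--   for log in logs:
--     server, res = log.split(" ")
--     if res != "success":
--       fails.append(server)
--   fails.sort()
--   total = 0
--   run = 0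
--   prev = None
--   for s in fails:
--     if s == prev:
--       run += 1
--     else:
--       total += run // 3
--       run = 1
--       prev = s
--   return total + run // 3
-- ===== Notes on version B (the rewrite author's own statement) =====
-- stated objective: alternative
-- what changed: B collects the failed server names into a list, sorts it, and counts complete runs of three equal names in one run-length scan over the sorted list, instead of A's per-server reset-at-3 counter dictionary maintained inline.
import Mathlib
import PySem

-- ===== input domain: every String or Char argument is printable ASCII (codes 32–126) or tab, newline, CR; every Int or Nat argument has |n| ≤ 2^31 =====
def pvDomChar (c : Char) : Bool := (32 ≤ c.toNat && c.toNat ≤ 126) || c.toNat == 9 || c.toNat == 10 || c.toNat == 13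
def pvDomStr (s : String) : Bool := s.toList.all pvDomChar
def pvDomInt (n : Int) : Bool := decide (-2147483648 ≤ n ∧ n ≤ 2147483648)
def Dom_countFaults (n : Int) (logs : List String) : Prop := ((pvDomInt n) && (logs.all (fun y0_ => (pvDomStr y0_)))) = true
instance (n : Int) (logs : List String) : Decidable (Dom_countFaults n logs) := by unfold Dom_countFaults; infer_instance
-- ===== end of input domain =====

-- B collects the failed servers, sorts them, and counts whole runs of 3 in one
-- linear scan over the sorted list, instead of A's per-server reset-at-3 counter
-- dictionary maintained inline (objective: alternative).

-- ===== PORT A =====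
def countFaultsGo : List String → Int → PySem.Dict String Int → Int
  | [], ans, _ => ans
  | log :: rest, ans, c =>
    match PySem.Str.split? log " " with
    | some [server, res] =>
      if res == "success" then countFaultsGo rest ans c
      else
        let c1 := c.modify server 0 (· + 1)          -- c[server] += 1 (Counter default 0)
        if c1.getD server 0 == 3 then
          countFaultsGo rest (ans + 1) (c1.insert server 0)
        else countFaultsGo rest ans c1
    | _ => ans                                       -- ValueError on unpacking: excluded by Pre_

def countFaults (n : Int) (logs : List String) : Int :=
  countFaultsGo logs 0 PySem.Dict.empty

-- ===== PORT B =====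
-- the fails-collecting loop of B
def pvFailsF (fails : List String) (log : String) : List String :=
  match PySem.Str.split? log " " with
  | some [server, res] => if res != "success" then fails ++ [server] else fails
  | _ => fails                                       -- ValueError on unpacking: excluded by Pre_

def pvFails (logs : List String) : List String := logs.foldl pvFailsF []

-- one step of B's run-length scan; state = (total, run, prev)
def pvScanStep (st : Int × Int × Option String) (s : String) : Int × Int × Option String :=
  if some s == st.2.2 then (st.1, st.2.1 + 1, st.2.2)
  else (st.1 + PySem.Int.floordiv st.2.1 3, 1, some s)

def countFaults_alt (n : Int) (logs : List String) : Int :=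
  let fails := PySem.List.sorted (pvFails logs) (fun x => x) false
  let st := fails.foldl pvScanStep (0, 0, none)
  st.1 + PySem.Int.floordiv st.2.1 3

-- ===== PRECONDITION & SPEC =====
-- Pre_ excludes exactly the logs on which `server, res = log.split(" ")` raises ValueError
-- (a log whose split on a single space does not have exactly two pieces) — same raise in A and B.
def Pre_countFaults (n : Int) (logs : List String) : Prop :=
  ∀ l ∈ logs, ((PySem.Str.split? l " ").getD []).length = 2
instance (n : Int) (logs : List String) : Decidable (Pre_countFaults n logs) := by
  unfold Pre_countFaults; infer_instance

def pvWitness_countFaults : Int × List String :=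
  (2, ["a fail", "a fail", "b success", "a fail", "a fail"])

def Spec_countFaults (n : Int) (logs : List String) (out : Int) : Prop := out = countFaults_alt n logs
instance (n : Int) (logs : List String) (out : Int) : Decidable (Spec_countFaults n logs out) := by unfold Spec_countFaults; infer_instance

-- ===== CLAIM (what is proved, stated in full; the proofs are below) =====
def Claim_equal_countFaults : Prop := ∀ (n : Int) (logs : List String), Dom_countFaults n logs → Pre_countFaults n logs → Spec_countFaults n logs (countFaults n logs)

-- ===== LEMMAS AND PROOFS =====

-- common reference value: sum over the distinct failed servers of (failure count) // 3
def pvFn (xs : List String) : Int := ∑ k ∈ xs.toFinset, ((xs.count k / 3 : Nat) : Int)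

theorem pvFn_perm (xs ys : List String) (h : xs.Perm ys) : pvFn xs = pvFn ys := by
  unfold pvFn
  rw [List.toFinset_eq_of_perm xs ys h]
  exact Finset.sum_congr rfl (fun k _ => by rw [h.count_eq])

theorem pvFn_split (x : String) (xs : List String) (hx : x ∈ xs) :
    pvFn xs = ((xs.count x / 3 : Nat) : Int) + pvFn (xs.filter (· != x)) := by
  unfold pvFn
  have hf : (xs.filter (· != x)).toFinset = xs.toFinset.erase x := by
    rw [List.toFinset_filter]
    rw [← Finset.filter_ne' xs.toFinset x]
    apply Finset.filter_congr
    intro y _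
    simp
  rw [hf]
  have hc : ∀ k ∈ xs.toFinset.erase x,
      (((xs.filter (· != x)).count k / 3 : Nat) : Int) = ((xs.count k / 3 : Nat) : Int) := by
    intro k hk
    have hkx : k ≠ x := (Finset.mem_erase.mp hk).1
    rw [List.count_filter (by simpa using hkx)]
  rw [Finset.sum_congr rfl hc]
  have := Finset.sum_erase_add xs.toFinset (fun k => ((xs.count k / 3 : Nat) : Int))
    (List.mem_toFinset.mpr hx)
  linarith [this]

-- ---- A-side: countFaultsGo equals pvFn of the failed servers ----

-- proof-side view of A's loop body acting only on the counter
def pvTally (logs : List String) (d : PySem.Dict String Int) : PySem.Dict String Int :=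
  logs.foldl (fun d log =>
    match PySem.Str.split? log " " with
    | some [server, res] => if res == "success" then d else d.modify server 0 (· + 1)
    | _ => d) d

def pvSumD (d : PySem.Dict String Int) : Int :=
  (d.keys.map (fun k => PySem.Int.floordiv (d.getD k 0) 3)).sum

theorem pv_sum_map_update (ks : List String) (s : String) (f g : String → Int)
    (hnd : ks.Nodup) (hs : s ∈ ks) (h : ∀ k ∈ ks, k ≠ s → g k = f k) :
    (ks.map g).sum = (ks.map f).sum + (g s - f s) := by
  induction ks with
  | nil => cases hs
  | cons a t ih =>
    rcases List.mem_cons.mp hs with rfl | hst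
    · have ht : ∀ k ∈ t, g k = f k := by
        intro k hk
        exact h k (List.mem_cons_of_mem _ hk) (fun he => (List.nodup_cons.mp hnd).1 (he ▸ hk))
      simp [List.map_cons, List.map_congr_left ht]
      ring
    · have ha : g a = f a := h a (List.mem_cons_self) (fun he => (List.nodup_cons.mp hnd).1 (he ▸ hst))
      have := ih (List.nodup_cons.mp hnd).2 hst (fun k hk => h k (List.mem_cons_of_mem _ hk))
      simp [List.map_cons, this, ha]; ring

theorem pv_keys_modify_incr (d : PySem.Dict String Int) (s : String) :
    (d.modify s 0 (· + 1)).keys =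
      if d.contains s = true then d.keys else d.keys ++ [s] := by
  rw [PySem.Dict.keys_modify]
  by_cases hc : d.contains s = true
  · rw [if_pos hc, PySem.Dict.keys_insert_of_contains d _ hc]
  · rw [if_neg hc, PySem.Dict.keys_insert_of_not_contains d _ (by simpa using hc)]

theorem pv_nodup_modify_incr (d : PySem.Dict String Int) (s : String)
    (hnd : d.keys.Nodup) : (d.modify s 0 (· + 1)).keys.Nodup := by
  rw [pv_keys_modify_incr]
  by_cases hc : d.contains s = true
  · rwa [if_pos hc]
  · rw [if_neg hc]
    refine List.Nodup.append hnd (by simp) ?_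
    intro a ha hb
    simp at hb; subst hb
    exact hc ((PySem.Dict.contains_iff_mem_keys d a).mpr ha)

theorem pvSumD_modify (d : PySem.Dict String Int) (s : String) (hnd : d.keys.Nodup) :
    pvSumD (d.modify s 0 (· + 1)) =
      pvSumD d + (PySem.Int.floordiv (d.getD s 0 + 1) 3 - PySem.Int.floordiv (d.getD s 0) 3) := by
  by_cases hc : d.contains s = true
  · have hkeys : (d.modify s 0 (· + 1)).keys = d.keys := by
      rw [pv_keys_modify_incr, if_pos hc]
    have hmem : s ∈ d.keys := (PySem.Dict.contains_iff_mem_keys d s).mp hc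
    unfold pvSumD
    rw [hkeys]
    rw [pv_sum_map_update d.keys s
        (fun k => PySem.Int.floordiv (d.getD k 0) 3)
        (fun k => PySem.Int.floordiv ((d.modify s 0 (· + 1)).getD k 0) 3)
        hnd hmem]
    · simp
    · intro k _ hk
      simp [PySem.Dict.getD_modify, hk]
  · have hc' : d.contains s = false := by simpa using hc
    have hkeys : (d.modify s 0 (· + 1)).keys = d.keys ++ [s] := by
      rw [pv_keys_modify_incr, if_neg hc]
    have hgd : d.getD s 0 = 0 := PySem.Dict.getD_of_not_contains d 0 hc'
    have hsk : s ∉ d.keys := fun hm => hc ((PySem.Dict.contains_iff_mem_keys d s).mpr hm)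
    unfold pvSumD
    rw [hkeys, List.map_append, List.sum_append]
    have heq : ∀ k ∈ d.keys,
        (d.modify s 0 (· + 1)).getD k 0 = d.getD k 0 := by
      intro k hk
      rw [PySem.Dict.getD_modify, if_neg (show ¬ k = s from fun he => hsk (he ▸ hk))]
    rw [List.map_congr_left (fun k hk => by rw [heq k hk])]
    simp only [List.map_cons, List.map_nil, List.sum_cons, List.sum_nil]
    rw [PySem.Dict.getD_modify]
    simp [hgd]

theorem pv_main (logs : List String) (ans : Int) (c d : PySem.Dict String Int)
    (hpre : ∀ l ∈ logs, ((PySem.Str.split? l " ").getD []).length = 2)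
    (hnd : d.keys.Nodup)
    (hrel : ∀ k, c.getD k 0 = PySem.Int.mod (d.getD k 0) 3)
    (hnn : ∀ k, 0 ≤ d.getD k 0) :
    countFaultsGo logs ans c = ans + (pvSumD (pvTally logs d) - pvSumD d) := by
  induction logs generalizing ans c d with
  | nil => simp [countFaultsGo, pvTally]
  | cons log rest ih =>
    have hlen := hpre log (List.mem_cons_self)
    have hprer : ∀ l ∈ rest, ((PySem.Str.split? l " ").getD []).length = 2 :=
      fun l hl => hpre l (List.mem_cons_of_mem _ hl)
    obtain ⟨server, res, hsp⟩ : ∃ a b, PySem.Str.split? log " " = some [a, b] := by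
      match h : PySem.Str.split? log " " with
      | some [a, b] => exact ⟨a, b, rfl⟩
      | none => rw [h] at hlen; simp at hlen
      | some [] => rw [h] at hlen; simp at hlen
      | some [a] => rw [h] at hlen; simp at hlen
      | some (a :: b :: c :: t) => rw [h] at hlen; simp at hlen
    rw [countFaultsGo, hsp]
    by_cases hsucc : res == "success"
    · simp only [hsucc, if_true]
      rw [ih ans c d hprer hnd hrel hnn]
      have htal : pvTally (log :: rest) d = pvTally rest d := by
        simp only [pvTally, List.foldl_cons, hsp, hsucc, if_true]
      rw [htal]
    · simp only [hsucc, if_false, Bool.false_eq_true]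
      set v := d.getD server 0 with hv
      have hvr := hrel server
      have hvn := hnn server
      have hvm : PySem.Int.mod v 3 = v % 3 := PySem.Int.mod_eq_emod_of_pos (by norm_num)
      set d' := d.modify server 0 (· + 1) with hd'
      have hnd' : d'.keys.Nodup := pv_nodup_modify_incr d server hnd
      have hgd' : ∀ k, d'.getD k 0 = if k = server then v + 1 else d.getD k 0 := by
        intro k; rw [hd', PySem.Dict.getD_modify]
      have hnn' : ∀ k, 0 ≤ d'.getD k 0 := by
        intro k; rw [hgd']; split
        · omega
        · exact hnn k
      have hsum := pvSumD_modify d server hnd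
      rw [← hd', ← hv] at hsum
      have hc1 : (c.modify server 0 (· + 1)).getD server 0 = PySem.Int.mod v 3 + 1 := by
        rw [PySem.Dict.getD_modify_self, hvr]
      have hfd : PySem.Int.floordiv (v + 1) 3 - PySem.Int.floordiv v 3 =
          (if PySem.Int.mod v 3 + 1 = 3 then 1 else 0) := by
        rw [hvm, PySem.Int.floordiv_eq_ediv_of_pos (a := v + 1) (by norm_num),
          PySem.Int.floordiv_eq_ediv_of_pos (a := v) (by norm_num)]
        split <;> omega
      by_cases h3 : PySem.Int.mod v 3 + 1 = 3
      · have hcond : ((c.modify server 0 (· + 1)).getD server 0 == 3) = true := by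
          rw [hc1, h3]; simp
        rw [if_pos hcond]
        have hrel' : ∀ k, ((c.modify server 0 (· + 1)).insert server 0).getD k 0 =
            PySem.Int.mod (d'.getD k 0) 3 := by
          intro k
          rw [PySem.Dict.getD_insert, PySem.Dict.getD_modify, hgd']
          split
          · rw [PySem.Int.mod_eq_emod_of_pos (b := 3) (by norm_num)]
            rw [hvm] at h3; omega
          · exact hrel k
        rw [ih (ans + 1) _ d' hprer hnd' hrel' hnn']
        have htal : pvTally (log :: rest) d = pvTally rest d' := by
          simp only [pvTally, List.foldl_cons, hsp, hsucc, if_false,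
            Bool.false_eq_true, ← hd']
        rw [htal, hsum, hfd, if_pos h3]
        ring
      · rw [if_neg (show ¬ ((c.modify server 0 (· + 1)).getD server 0 == 3) = true by
          rw [hc1]; simpa using h3)]
        have hrel' : ∀ k, (c.modify server 0 (· + 1)).getD k 0 =
            PySem.Int.mod (d'.getD k 0) 3 := by
          intro k
          rw [PySem.Dict.getD_modify, hgd']
          split
          · rw [hvr, hvm, PySem.Int.mod_eq_emod_of_pos (b := 3) (by norm_num)]
            rw [hvm] at h3
            have hb : 0 ≤ v % 3 ∧ v % 3 < 3 :=
              ⟨Int.emod_nonneg v (by norm_num), Int.emod_lt_of_pos v (by norm_num)⟩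
            omega
          · exact hrel k
        rw [ih ans _ d' hprer hnd' hrel' hnn']
        have htal : pvTally (log :: rest) d = pvTally rest d' := by
          simp only [pvTally, List.foldl_cons, hsp, hsucc, if_false,
            Bool.false_eq_true, ← hd']
        rw [htal, hsum, hfd, if_neg h3]
        ring

-- pvFails's fold appends on the right, so the accumulator factors out
theorem pvFails_acc (logs : List String) (acc : List String) :
    logs.foldl pvFailsF acc = acc ++ logs.foldl pvFailsF [] := by
  induction logs generalizing acc with
  | nil => simp
  | cons log rest ih =>
    have hstep : ∀ a : List String, pvFailsF a log = a ++ pvFailsF [] log := by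
      intro a
      simp only [pvFailsF]
      cases hsp : PySem.Str.split? log " " with
      | none => simp
      | some l =>
        cases l with
        | nil => simp
        | cons s l2 =>
          cases l2 with
          | nil => simp
          | cons r l3 =>
            cases l3 with
            | nil => by_cases hr : (r != "success") = true <;> simp [hr]
            | cons c t => simp
    rw [List.foldl_cons, List.foldl_cons, ih, ih (pvFailsF [] log), hstep acc,
      List.append_assoc]

-- A's counter updates are exactly Counter(pvFails logs)
theorem pvTally_eq_counter (logs : List String) :
    pvTally logs PySem.Dict.empty = PySem.Dict.counter (pvFails logs) := by
  rw [PySem.Dict.counter_eq_foldl]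
  suffices h : ∀ (logs : List String) (d : PySem.Dict String Int),
      pvTally logs d = (logs.foldl pvFailsF []).foldl (fun d x => d.modify x 0 (· + 1)) d by
    exact h logs PySem.Dict.empty
  intro logs
  induction logs with
  | nil => intro d; simp [pvTally]
  | cons log rest ih =>
    intro d
    rw [show (log :: rest).foldl pvFailsF [] = pvFailsF [] log ++ rest.foldl pvFailsF [] by
      rw [List.foldl_cons, pvFails_acc]]
    rw [List.foldl_append]
    cases hsp : PySem.Str.split? log " " with
    | none =>
      simp only [pvTally, pvFailsF, List.foldl_cons, hsp, List.foldl_nil]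
      exact ih d
    | some l =>
      cases l with
      | nil =>
        simp only [pvTally, pvFailsF, List.foldl_cons, hsp, List.foldl_nil]
        exact ih d
      | cons s l2 =>
        cases l2 with
        | nil =>
          simp only [pvTally, pvFailsF, List.foldl_cons, hsp, List.foldl_nil]
          exact ih d
        | cons r l3 =>
          cases l3 with
          | cons c t =>
            simp only [pvTally, pvFailsF, List.foldl_cons, hsp, List.foldl_nil]
            exact ih d
          | nil =>
            by_cases hsucc : (r == "success") = true
            · have hne : (r != "success") = false := by simp [bne, hsucc]
              simp only [pvTally, pvFailsF, List.foldl_cons, hsp, hsucc, hne, if_true,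
                if_false, Bool.false_eq_true, List.nil_append, List.foldl_nil]
              exact ih d
            · have h1 : (r == "success") = false := by simpa using hsucc
              have h2 : (r != "success") = true := by simp [bne, h1]
              simp only [pvTally, pvFailsF, List.foldl_cons, hsp, h1, h2, if_true,
                if_false, Bool.false_eq_true, List.nil_append, List.foldl_cons, List.foldl_nil]
              exact ih _

-- pvSumD of Counter(xs) is pvFn xs
theorem pvSumD_counter (xs : List String) : pvSumD (PySem.Dict.counter xs) = pvFn xs := by
  unfold pvSumD
  rw [PySem.Dict.keys_counter]
  have hmap : (PySem.Set.ofList xs).map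
        (fun k => PySem.Int.floordiv ((PySem.Dict.counter xs).getD k 0) 3) =
      (PySem.Set.ofList xs).map (fun k => ((xs.count k / 3 : Nat) : Int)) := by
    apply List.map_congr_left
    intro k _
    rw [PySem.Dict.getD_counter]
    exact_mod_cast PySem.Int.floordiv_natCast (xs.count k) 3
  rw [hmap]
  rw [← List.sum_toFinset _ (PySem.Set.nodup_ofList xs)]
  unfold pvFn
  apply Finset.sum_congr
  · ext k
    simp [PySem.Set.mem_ofList]
  · intro k _; rfl

-- ---- B-side: the run-length scan of a sorted list computes pvFn ----

theorem pv_scan_run (ys : List String) (hs : ys.Pairwise (· ≤ ·)) :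
    ∀ (t : Int) (r : Nat) (a : String), (∀ b ∈ ys, a ≤ b) →
    (let st := ys.foldl pvScanStep (t, (r : Int), some a)
     st.1 + PySem.Int.floordiv st.2.1 3)
    = t + (((r + ys.count a) / 3 : Nat) : Int) + pvFn (ys.filter (· != a)) := by
  induction ys with
  | nil =>
    intro t r a _
    simp only [List.foldl_nil, List.filter_nil, List.count_nil, Nat.add_zero]
    have h0 : pvFn ([] : List String) = 0 := by simp [pvFn]
    have hdiv : PySem.Int.floordiv (r : Int) 3 = ((r / 3 : Nat) : Int) := by
      exact_mod_cast PySem.Int.floordiv_natCast r 3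
    simp only [h0, hdiv, add_zero]
  | cons b zs ih =>
    intro t r a hle
    have hzs : zs.Pairwise (· ≤ ·) := (List.pairwise_cons.mp hs).2
    have hbz : ∀ c ∈ zs, b ≤ c := (List.pairwise_cons.mp hs).1
    by_cases hba : b = a
    · subst hba
      have hstep : pvScanStep (t, (r : Int), some b) b = (t, (r : Int) + 1, some b) := by
        simp [pvScanStep]
      rw [List.foldl_cons, hstep]
      have := ih hzs t (r + 1) b (fun c hc => hbz c hc)
      rw [show ((r : Int) + 1) = ((r + 1 : Nat) : Int) by push_cast; ring]
      rw [this]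
      have hcnt : (b :: zs).count b = zs.count b + 1 := List.count_cons_self
      have hfil : (b :: zs).filter (· != b) = zs.filter (· != b) := by simp
      rw [hcnt, hfil]
      congr 2
      omega
    · have hab : a < b := lt_of_le_of_ne (hle b List.mem_cons_self) (fun h => hba h.symm)
      have hstep : pvScanStep (t, (r : Int), some a) b =
          (t + PySem.Int.floordiv (r : Int) 3, 1, some b) := by
        simp [pvScanStep, hba]
      rw [List.foldl_cons, hstep]
      have h1 : ((1 : Nat) : Int) = (1 : Int) := by norm_num
      have := ih hzs (t + PySem.Int.floordiv (r : Int) 3) 1 b hbz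
      rw [h1] at this
      rw [this]
      have hanot : a ∉ b :: zs := by
        intro hmem
        rcases List.mem_cons.mp hmem with rfl | hmem
        · exact absurd rfl (ne_of_lt hab)
        · exact absurd (hle a (List.mem_cons_of_mem _ hmem)) (not_le.mpr (lt_of_lt_of_le hab (hbz a hmem)))
      have hcnt0 : (b :: zs).count a = 0 := List.count_eq_zero.mpr hanot
      have hfila : (b :: zs).filter (· != a) = b :: zs := by
        apply List.filter_eq_self.mpr
        intro c hc
        simp only [bne_iff_ne, ne_eq]
        intro h
        exact hanot (h ▸ hc)
      rw [hcnt0, hfila]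
      have hsplit := pvFn_split b (b :: zs) List.mem_cons_self
      rw [List.count_cons_self] at hsplit
      rw [show (b :: zs).filter (· != b) = zs.filter (· != b) by simp] at hsplit
      have hdiv : PySem.Int.floordiv (r : Int) 3 = ((r / 3 : Nat) : Int) := by
        exact_mod_cast PySem.Int.floordiv_natCast r 3
      rw [hsplit, hdiv]
      have : zs.count b + 1 = 1 + zs.count b := by omega
      rw [this]
      ring_nf

theorem pv_scan0 (ys : List String) (hs : ys.Pairwise (· ≤ ·)) :
    (let st := ys.foldl pvScanStep (0, 0, none)
     st.1 + PySem.Int.floordiv st.2.1 3) = pvFn ys := by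
  match ys with
  | [] => simp [pvFn]
  | b :: zs =>
    have hzs : zs.Pairwise (· ≤ ·) := (List.pairwise_cons.mp hs).2
    have hbz : ∀ c ∈ zs, b ≤ c := (List.pairwise_cons.mp hs).1
    have hstep : pvScanStep (0, 0, none) b = (0, 1, some b) := by
      simp [pvScanStep]
    simp only [List.foldl_cons, hstep]
    have := pv_scan_run zs hzs 0 1 b hbz
    rw [show ((1 : Nat) : Int) = (1 : Int) by norm_num] at this
    rw [this]
    have hsplit := pvFn_split b (b :: zs) List.mem_cons_self
    rw [List.count_cons_self] at hsplit
    rw [show (b :: zs).filter (· != b) = zs.filter (· != b) by simp] at hsplit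
    rw [hsplit]
    have : zs.count b + 1 = 1 + zs.count b := by omega
    rw [this]
    ring

-- ===== VERDICT (by name: the statement is the Claim_ definition above) =====
theorem countFaults_spec : Claim_equal_countFaults := by
  intro n logs _ hpre
  unfold Spec_countFaults countFaults countFaults_alt
  have hnd0 : (PySem.Dict.empty : PySem.Dict String Int).keys.Nodup := by
    simp [PySem.Dict.keys_empty]
  rw [pv_main logs 0 PySem.Dict.empty PySem.Dict.empty hpre hnd0
      (fun k => by simp [PySem.Dict.getD_empty, PySem.Int.mod])
      (fun k => by simp [PySem.Dict.getD_empty])]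
  rw [pvTally_eq_counter, pvSumD_counter]
  have hsorted := PySem.List.sorted_pairwise (pvFails logs) (fun x => x)
  have hscan := pv_scan0 (PySem.List.sorted (pvFails logs) (fun x => x) false)
    (by simpa using hsorted)
  simp only at hscan ⊢
  rw [hscan, pvFn_perm _ _ (PySem.List.sorted_perm (pvFails logs) (fun x => x) false)]
  simp [pvSumD, PySem.Dict.keys_empty]
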